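-- pv_equiv track=rewrite | github.com/avdes96/advent_of_code | day_02/solution.py | row_safe_part_1
-- ===== SOURCE A (Python) =====
-- from enum import Enum
--
-- class Direction(Enum):
-- 	INCREASING = 0
-- 	DECREASING = 1
-- 	UNDETERMINED = 2
--
-- def row_safe_part_1(row: list) -> bool:
-- 	direction = Direction.UNDETERMINED
-- 	for i in range(1, len(row)):
-- 		val_l, val_r = int(row[i - 1]), int(row[i])
-- 		if val_l == val_r:
-- 			return False
-- 		elif val_l < val_r:
-- 			if direction is Direction.UNDETERMINED:
-- 				direction = Direction.INCREASING
-- 			elif direction is Direction.DECREASING: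
-- 				return False
-- 			if val_r - val_l > 3:
-- 				return False
-- 		else:
-- 			if direction is Direction.UNDETERMINED:
-- 				direction = Direction.DECREASING
-- 			elif direction is Direction.INCREASING:
-- 				return False
-- 			if val_l - val_r > 3:
-- 				return False
-- 	return True
-- ===== SOURCE B (Python) =====
-- def row_safe_part_1(row: list) -> bool:
--     vals = [int(x) for x in row]
--     diffs = [b - a for a, b in zip(vals, vals[1:])]
--     return all(1 <= d <= 3 for d in diffs) or all(-3 <= d <= -1 for d in diffs)
-- ===== Notes on version B (the rewrite author's own statement) =====
-- stated objective: simpler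
-- what changed: Replaced the running Direction state machine with early returns by building the consecutive-difference list once and testing it with two global bounded-monotone all() scans.
import Mathlib
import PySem

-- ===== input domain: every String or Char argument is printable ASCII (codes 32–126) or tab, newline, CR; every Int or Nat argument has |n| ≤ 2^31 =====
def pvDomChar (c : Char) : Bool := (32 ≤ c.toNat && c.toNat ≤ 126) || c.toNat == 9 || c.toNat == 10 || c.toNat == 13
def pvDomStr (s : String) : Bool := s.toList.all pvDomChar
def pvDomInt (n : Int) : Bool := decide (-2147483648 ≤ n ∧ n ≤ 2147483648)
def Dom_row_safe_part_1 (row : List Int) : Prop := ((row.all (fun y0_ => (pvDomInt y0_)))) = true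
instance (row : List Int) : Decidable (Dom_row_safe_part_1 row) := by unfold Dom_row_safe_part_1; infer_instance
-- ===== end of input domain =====

-- B replaces A's running Direction state machine (with early returns) by building the
-- consecutive-difference list once and testing it with two global bounded-monotone scans (objective: simpler).

-- ===== PORT A =====
inductive PvDirection | increasing | decreasing | undetermined
deriving DecidableEq, Repr

-- the for-loop over range(1, len(row)): state = direction, previous value; early return = returning false
def pvLoopA (direction : PvDirection) (val_l : Int) (rest : List Int) : Bool :=
  match rest with
  | [] => true
  | val_r :: rest' =>
    if val_l = val_r then false
    else if val_l < val_r then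
      if direction = PvDirection.decreasing then false
      else if val_r - val_l > 3 then false
      else pvLoopA PvDirection.increasing val_r rest'
    else
      if direction = PvDirection.increasing then false
      else if val_l - val_r > 3 then false
      else pvLoopA PvDirection.decreasing val_r rest'

def row_safe_part_1 (row : List Int) : Bool :=
  match row with
  | [] => true
  | x :: xs => pvLoopA PvDirection.undetermined x xs

-- ===== PORT B =====
def row_safe_part_1_alt (row : List Int) : Bool :=
  let diffs := (row.zip row.tail).map (fun p => p.2 - p.1)
  diffs.all (fun d => decide (1 ≤ d ∧ d ≤ 3)) || diffs.all (fun d => decide (-3 ≤ d ∧ d ≤ -1))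

-- ===== PRECONDITION & SPEC =====
def Spec_row_safe_part_1 (row : List Int) (out : Bool) : Prop := out = row_safe_part_1_alt row
instance (row : List Int) (out : Bool) : Decidable (Spec_row_safe_part_1 row out) := by unfold Spec_row_safe_part_1; infer_instance

-- ===== CLAIM (what is proved, stated in full; the proofs are below) =====
def Claim_equal_row_safe_part_1 : Prop := ∀ (row : List Int), Dom_row_safe_part_1 row → Spec_row_safe_part_1 row (row_safe_part_1 row)

-- ===== LEMMAS AND PROOFS =====

def pvDiffs (l : Int) (rest : List Int) : List Int :=
  ((l :: rest).zip rest).map (fun p => p.2 - p.1)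

theorem pvDiffs_cons (l r : Int) (rest : List Int) :
    pvDiffs l (r :: rest) = (r - l) :: pvDiffs r rest := by
  simp [pvDiffs]

theorem pvLoopA_inc (rest : List Int) : ∀ l : Int,
    pvLoopA PvDirection.increasing l rest =
      (pvDiffs l rest).all (fun d => decide (1 ≤ d ∧ d ≤ 3)) := by
  induction rest with
  | nil => intro l; simp [pvLoopA, pvDiffs]
  | cons r rest ih =>
    intro l
    rw [pvDiffs_cons]
    simp only [pvLoopA, List.all_cons, ih, Bool.decide_and]
    cases hI : (pvDiffs r rest).all (fun d => decide (1 ≤ d) && decide (d ≤ 3)) <;>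
      split_ifs <;> simp_all <;> omega

theorem pvLoopA_dec (rest : List Int) : ∀ l : Int,
    pvLoopA PvDirection.decreasing l rest =
      (pvDiffs l rest).all (fun d => decide (-3 ≤ d ∧ d ≤ -1)) := by
  induction rest with
  | nil => intro l; simp [pvLoopA, pvDiffs]
  | cons r rest ih =>
    intro l
    rw [pvDiffs_cons]
    simp only [pvLoopA, List.all_cons, ih, Bool.decide_and]
    cases hD : (pvDiffs r rest).all (fun d => decide (-3 ≤ d) && decide (d ≤ -1)) <;>
      split_ifs <;> simp_all <;> omega

theorem pvLoopA_und (l : Int) (rest : List Int) :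
    pvLoopA PvDirection.undetermined l rest =
      ((pvDiffs l rest).all (fun d => decide (1 ≤ d ∧ d ≤ 3)) ||
       (pvDiffs l rest).all (fun d => decide (-3 ≤ d ∧ d ≤ -1))) := by
  cases rest with
  | nil => simp [pvLoopA, pvDiffs]
  | cons r rest =>
    rw [pvDiffs_cons]
    simp only [pvLoopA, List.all_cons, pvLoopA_inc, pvLoopA_dec, Bool.decide_and]
    cases hI : (pvDiffs r rest).all (fun d => decide (1 ≤ d) && decide (d ≤ 3)) <;>
      cases hD : (pvDiffs r rest).all (fun d => decide (-3 ≤ d) && decide (d ≤ -1)) <;>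
        split_ifs <;> simp_all <;> omega

-- ===== VERDICT (by name: the statement is the Claim_ definition above) =====
theorem row_safe_part_1_spec : Claim_equal_row_safe_part_1 := by
  intro row _
  unfold Spec_row_safe_part_1 row_safe_part_1 row_safe_part_1_alt
  cases row with
  | nil => simp
  | cons x xs => simpa [pvDiffs] using pvLoopA_und x xs
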